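-- pv_equiv track=rewrite | github.com/GoldenStone02/PSEC-assignment | python/user.py | check_user_input
-- ===== SOURCE A (Python) =====
-- def check_user_input(userInput: str, question_data: list):
--     check_list = []
--     for i, option in enumerate(question_data):
--         check_list.extend(chr(97 + i))
--     for check in check_list:
--         if check == userInput.lower():
--             return True
--     return False
-- ===== SOURCE B (Python) =====
-- def check_user_input(userInput: str, question_data: list):
--     s = userInput.lower()
--     if len(s) != 1:
--         return False
--     idx = ord(s) - 97
--     return 0 <= idx < len(question_data)
-- ===== Notes on version B (the rewrite author's own statement) =====
-- stated objective: faster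
-- what changed: Replaces building a list of option letters and linearly scanning it with a single length-1 guard plus an arithmetic bounds check on ord(lowercased char) - 97.
import Mathlib
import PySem

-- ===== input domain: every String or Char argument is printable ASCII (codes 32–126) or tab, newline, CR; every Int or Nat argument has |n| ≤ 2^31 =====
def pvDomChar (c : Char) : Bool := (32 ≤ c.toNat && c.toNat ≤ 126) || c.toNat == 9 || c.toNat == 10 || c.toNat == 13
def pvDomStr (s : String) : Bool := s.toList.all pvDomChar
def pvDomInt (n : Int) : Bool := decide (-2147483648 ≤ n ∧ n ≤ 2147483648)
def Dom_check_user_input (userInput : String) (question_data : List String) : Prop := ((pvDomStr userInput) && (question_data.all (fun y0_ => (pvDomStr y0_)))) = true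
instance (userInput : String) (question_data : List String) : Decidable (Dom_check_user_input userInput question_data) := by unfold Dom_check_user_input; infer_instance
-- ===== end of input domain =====

-- B replaces A's build-a-letter-list-then-scan with a length-1 guard plus an arithmetic bounds check: O(1) instead of O(n) after lowercasing (measured faster in a timing run).

-- ===== PORT A =====
def check_user_input (userInput : String) (question_data : List String) : Bool :=
  -- check_list = []; for i, option in enumerate(question_data): check_list.extend(chr(97 + i))
  let check_list : List Char :=
    (PySem.List.enumerate question_data).foldl
      (fun acc p => acc ++ [Char.ofNat (97 + p.1).toNat]) []
  -- for check in check_list: if check == userInput.lower(): return True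
  -- return False
  check_list.any (fun check => String.ofList [check] == PySem.Str.lower userInput)

-- ===== PORT B =====
def check_user_input_alt (userInput : String) (question_data : List String) : Bool :=
  match (PySem.Str.lower userInput).toList with
  | [c] => decide (0 ≤ (c.toNat : Int) - 97 ∧ (c.toNat : Int) - 97 < question_data.length)
  | _ => false

-- ===== PRECONDITION & SPEC =====
def Spec_check_user_input (userInput : String) (question_data : List String) (out : Bool) : Prop := out = check_user_input_alt userInput question_data
instance (userInput : String) (question_data : List String) (out : Bool) : Decidable (Spec_check_user_input userInput question_data out) := by unfold Spec_check_user_input; infer_instance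

-- ===== CLAIM (what is proved, stated in full; the proofs are below) =====
def Claim_equal_check_user_input : Prop := ∀ (userInput : String) (question_data : List String), Dom_check_user_input userInput question_data → Spec_check_user_input userInput question_data (check_user_input userInput question_data)

-- ===== LEMMAS AND PROOFS =====

-- A's accumulating loop over enumerate builds exactly the list of letters chr(97+s), …, chr(97+s+n-1).
theorem pv_fold_chars (xs : List String) (s : Nat) (acc : List Char) :
    (PySem.List.enumerate xs (s : Int)).foldl
      (fun acc p => acc ++ [Char.ofNat (97 + p.1).toNat]) acc
    = acc ++ (List.range xs.length).map (fun k => Char.ofNat (97 + s + k)) := by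
  induction xs generalizing s acc with
  | nil => simp [PySem.List.enumerate]
  | cons x xs ih =>
    rw [PySem.List.enumerate_cons]
    have hcast : ((s : Int) + 1) = ((s + 1 : Nat) : Int) := by push_cast; ring
    simp only [List.foldl_cons, hcast, ih]
    have h1 : (97 + (s : Int)).toNat = 97 + s := by omega
    rw [h1]
    simp only [List.length_cons]
    rw [List.range_succ_eq_map, List.map_cons, List.map_map, List.append_assoc,
      List.singleton_append]
    congr 1
    congr 1
    apply List.map_congr_left
    intro a _
    simp only [Function.comp]
    congr 1
    omega

theorem pv_ofList_eq_iff (l : List Char) (s : String) : String.ofList l = s ↔ l = s.toList :=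
  ⟨fun h => by rw [← h, String.toList_ofList], fun h => by rw [h, String.ofList_toList]⟩

theorem pv_toNat_ofNat (m : Nat) : (Char.ofNat m).toNat = if m.isValidChar then m else 0 := by
  unfold Char.ofNat
  split <;> simp_all [Char.toNat, Char.ofNatAux]

theorem pv_lower_dom (u : String) (hu : pvDomStr u = true) (c : Char)
    (hc : c ∈ (PySem.Str.lower u).toList) : 9 ≤ c.toNat ∧ c.toNat ≤ 126 := by
  rw [PySem.Str.toList_lower] at hc
  simp only [PySem.Chars.lower, List.mem_map] at hc
  obtain ⟨c', hc', rfl⟩ := hc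
  have hd : pvDomChar c' = true := by
    simp only [pvDomStr, List.all_eq_true] at hu
    exact hu c' hc'
  simp only [pvDomChar, Bool.or_eq_true, Bool.and_eq_true, decide_eq_true_eq, beq_iff_eq] at hd
  simp only [PySem.Chars.lowerChar]
  split
  · rename_i h
    have : 65 ≤ c'.toNat ∧ c'.toNat ≤ 90 := by
      simp only [PySem.Chars.isupper, Bool.and_eq_true, decide_eq_true_eq] at h
      exact ⟨h.1, h.2⟩
    rw [pv_toNat_ofNat]
    have hv : (c'.toNat + 32).isValidChar := by
      unfold Nat.isValidChar
      omega
    rw [if_pos hv]; omega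
  · omega

theorem check_user_input_spec' (userInput : String) (question_data : List String)
    (h : Dom_check_user_input userInput question_data) :
    check_user_input userInput question_data = check_user_input_alt userInput question_data := by
  have hu : pvDomStr userInput = true := by
    simp only [Dom_check_user_input, Bool.and_eq_true] at h
    exact h.1
  unfold check_user_input check_user_input_alt
  have h0 : ((0 : Int)) = ((0 : Nat) : Int) := rfl
  rw [show PySem.List.enumerate question_data = PySem.List.enumerate question_data ((0:Nat):Int) from rfl]
  rw [pv_fold_chars]
  simp only [List.nil_append]
  rw [Bool.eq_iff_iff]
  simp only [List.any_eq_true, List.mem_map, List.mem_range, beq_iff_eq]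
  constructor
  · rintro ⟨_, ⟨k, hk, rfl⟩, hmk⟩
    rw [pv_ofList_eq_iff] at hmk
    -- the matched letter is a char of the lowered input, hence ASCII
    have hc : Char.ofNat (97 + 0 + k) ∈ (PySem.Str.lower userInput).toList := by
      rw [← hmk]; simp
    have hdom := pv_lower_dom userInput hu _ hc
    have hval : (97 + 0 + k).isValidChar := by
      rw [pv_toNat_ofNat] at hdom
      by_contra hnv
      rw [if_neg hnv] at hdom
      omega
    have htn : (Char.ofNat (97 + 0 + k)).toNat = 97 + k := by
      rw [pv_toNat_ofNat, if_pos hval]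
    rw [← hmk]
    simp only [htn]
    rw [decide_eq_true_iff]
    omega
  · intro hB
    rcases hm : (PySem.Str.lower userInput).toList with _ | ⟨c, rest⟩
    · simp [hm] at hB
    · rcases rest with _ | ⟨c2, rest2⟩
      · simp only [hm] at hB
        have hd : 0 ≤ (c.toNat : Int) - 97 ∧ (c.toNat : Int) - 97 < (question_data.length : Int) := by
          exact_mod_cast of_decide_eq_true hB
        refine ⟨c, ⟨c.toNat - 97, by omega, ?_⟩, ?_⟩
        · have : 97 + 0 + (c.toNat - 97) = c.toNat := by omega
          rw [this, Char.ofNat_toNat]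
        · rw [pv_ofList_eq_iff, hm]
      · simp [hm] at hB

-- ===== VERDICT (by name: the statement is the Claim_ definition above) =====
theorem check_user_input_spec : Claim_equal_check_user_input := by
  intro u qd h
  exact check_user_input_spec' u qd h
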